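-- pv_equiv track=rewrite | github.com/PGeogre/traj_token | prepare_dataset.py | h3_to_tokens_relative
-- ===== SOURCE A (Python) =====
-- def h3_to_tokens_hierarchical_optimized(h3_str):
--     """优化的层级化H3令牌，去掉H3_FULL以减少词表大小"""
--     h3_str = str(h3_str).lower()
--
--     if len(h3_str) >= 15:  # 标准H3长度
--         tokens = []
--         # 分辨率级别（固定范围0-15，词表大小固定）
--         tokens.append(f"H3_RES_{h3_str[1]}")
--
--         # 多层级地理区域（显著减少词表大小）
--         tokens.append(f"H3_L1_{h3_str[:3]}")   # 大区域 (~16^2 = 256个)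
--         tokens.append(f"H3_L2_{h3_str[:5]}")   # 中区域 (~16^4 = 65k个)
--         tokens.append(f"H3_L3_{h3_str[:7]}")   # 小区域 (~16^6 = 16M个，但可控)
--         tokens.append(f"H3_L4_{h3_str[:9]}")   # 精细区域
--
--         # 不再使用H3_FULL，避免词表爆炸
--         return tokens
--     else:
--         return [f"H3_SHORT_{h3_str}"]
--
-- def h3_to_tokens_relative(h3_str, prev_h3_str=None):
--     """基于相对位置的H3令牌化，减少绝对位置依赖"""
--     h3_str = str(h3_str).lower()
--
--     if prev_h3_str is None:
--         # 第一个点，使用简化的绝对位置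
--         return h3_to_tokens_hierarchical_optimized(h3_str)
--
--     prev_h3_str = str(prev_h3_str).lower()
--     tokens = []
--
--     # 比较分辨率变化
--     if len(h3_str) >= 2 and len(prev_h3_str) >= 2:
--         curr_res = h3_str[1]
--         prev_res = prev_h3_str[1]
--
--         if curr_res == prev_res:
--             tokens.append("H3_RES_SAME")
--         else:
--             tokens.append(f"H3_RES_CHANGE_{curr_res}")
--
--     # 比较区域变化（逐层比较）
--     for i, (level_name, end_pos) in enumerate([("L1", 3), ("L2", 5), ("L3", 7), ("L4", 9)]):
--         if len(h3_str) >= end_pos and len(prev_h3_str) >= end_pos: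
--             curr_level = h3_str[:end_pos]
--             prev_level = prev_h3_str[:end_pos]
--
--             if curr_level == prev_level:
--                 tokens.append(f"H3_{level_name}_SAME")
--             else:
--                 tokens.append(f"H3_{level_name}_CHANGE")
--                 # 只在变化时记录新的区域（减少词表）
--                 tokens.append(f"H3_{level_name}_NEW_{curr_level[-2:]}")  # 只记录最后2位
--
--     return tokens
-- ===== SOURCE B (Python) =====
-- def _level_tokens(name, end_pos, s, prev, p):
--     # one level: guarded by both lengths, decided by the divergence point p
--     if len(s) < end_pos or len(prev) < end_pos:
--         return []
--     if p >= end_pos: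
--         return ["H3_%s_SAME" % name]
--     return ["H3_%s_CHANGE" % name, "H3_%s_NEW_%s" % (name, s[end_pos - 2:end_pos])]
--
--
-- def h3_to_tokens_relative(h3_str, prev_h3_str=None):
--     s = str(h3_str).lower()
--     if prev_h3_str is None:
--         if len(s) < 15:
--             return ["H3_SHORT_" + s]
--         return ["H3_RES_" + s[1], "H3_L1_" + s[:3], "H3_L2_" + s[:5],
--                 "H3_L3_" + s[:7], "H3_L4_" + s[:9]]
--     prev = str(prev_h3_str).lower()
--     # single scan: longest common prefix length of s and prev
--     p = 0
--     m = min(len(s), len(prev))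
--     while p < m and s[p] == prev[p]:
--         p += 1
--     tokens = []
--     if len(s) >= 2 and len(prev) >= 2:
--         if s[1] == prev[1]:
--             tokens.append("H3_RES_SAME")
--         else:
--             tokens.append("H3_RES_CHANGE_" + s[1])
--     return (tokens + _level_tokens("L1", 3, s, prev, p)
--                    + _level_tokens("L2", 5, s, prev, p)
--                    + _level_tokens("L3", 7, s, prev, p)
--                    + _level_tokens("L4", 9, s, prev, p))
-- ===== Notes on version B (the rewrite author's own statement) =====
-- stated objective: alternative
-- what changed: Replaces A's per-level slice-and-compare (re-slicing both strings at each of the four levels) by one longest-common-prefix scan whose divergence point p decides every level by a threshold test p >= end_pos; the four levels become independent helper calls concatenated instead of a loop appending to an accumulator.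
import Mathlib
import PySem

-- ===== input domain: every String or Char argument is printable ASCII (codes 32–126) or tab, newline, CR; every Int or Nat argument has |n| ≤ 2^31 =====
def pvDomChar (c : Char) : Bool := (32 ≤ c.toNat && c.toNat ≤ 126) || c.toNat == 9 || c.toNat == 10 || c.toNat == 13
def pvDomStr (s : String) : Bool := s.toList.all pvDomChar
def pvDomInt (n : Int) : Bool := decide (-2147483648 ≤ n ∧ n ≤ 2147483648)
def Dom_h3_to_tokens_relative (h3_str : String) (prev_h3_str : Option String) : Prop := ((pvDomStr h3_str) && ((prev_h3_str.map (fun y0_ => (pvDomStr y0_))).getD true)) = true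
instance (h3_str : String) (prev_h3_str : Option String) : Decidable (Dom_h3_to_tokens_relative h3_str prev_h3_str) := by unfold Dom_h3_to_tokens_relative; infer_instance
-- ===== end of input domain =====

-- ===== PORT A =====
-- B replaces A's per-level slice-and-compare by one longest-common-prefix scan; alternative decomposition, not faster.

-- port of h3_to_tokens_hierarchical_optimized
def pvHierOpt (h3 : List Char) : List String :=
  let s := PySem.Chars.lower h3
  if 15 ≤ s.length then
    [String.mk ("H3_RES_".toList ++ [PySem.List.pyGetD s 1 ' ']),
     String.mk ("H3_L1_".toList ++ PySem.List.slice s none (some ((3 : Nat) : Int))),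
     String.mk ("H3_L2_".toList ++ PySem.List.slice s none (some ((5 : Nat) : Int))),
     String.mk ("H3_L3_".toList ++ PySem.List.slice s none (some ((7 : Nat) : Int))),
     String.mk ("H3_L4_".toList ++ PySem.List.slice s none (some ((9 : Nat) : Int)))]
  else
    [String.mk ("H3_SHORT_".toList ++ s)]

def h3_to_tokens_relative (h3_str : String) (prev_h3_str : Option String) : List String :=
  let s := PySem.Chars.lower h3_str.toList
  match prev_h3_str with
  | none => pvHierOpt s
  | some prev0 =>
    let pv := PySem.Chars.lower prev0.toList
    let tokens : List String :=
      if 2 ≤ s.length ∧ 2 ≤ pv.length then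
        if PySem.List.pyGetD s 1 ' ' = PySem.List.pyGetD pv 1 ' ' then
          ["H3_RES_SAME"]
        else
          [String.mk ("H3_RES_CHANGE_".toList ++ [PySem.List.pyGetD s 1 ' '])]
      else []
    List.foldl (fun acc (lv : String × Nat) =>
        if lv.2 ≤ s.length ∧ lv.2 ≤ pv.length then
          let currLevel := PySem.List.slice s none (some ((lv.2 : Nat) : Int))
          let prevLevel := PySem.List.slice pv none (some ((lv.2 : Nat) : Int))
          if currLevel = prevLevel then
            acc ++ [String.mk ("H3_".toList ++ lv.1.toList ++ "_SAME".toList)]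
          else
            acc ++ [String.mk ("H3_".toList ++ lv.1.toList ++ "_CHANGE".toList),
                    String.mk ("H3_".toList ++ lv.1.toList ++ "_NEW_".toList ++
                               PySem.List.slice currLevel (some (-2)) none)]
        else acc)
      tokens [("L1", 3), ("L2", 5), ("L3", 7), ("L4", 9)]

-- ===== PORT B =====
-- longest common prefix length (B's single divergence scan)
def pvLcp : List Char → List Char → Nat
  | a :: as, b :: bs => if a = b then pvLcp as bs + 1 else 0
  | _, _ => 0

-- port of _level_tokens
def pvLevelTokens (name : String) (endPos : Nat) (s pv : List Char) (p : Nat) : List String :=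
  if s.length < endPos ∨ pv.length < endPos then []
  else if endPos ≤ p then
    [String.mk ("H3_".toList ++ name.toList ++ "_SAME".toList)]
  else
    [String.mk ("H3_".toList ++ name.toList ++ "_CHANGE".toList),
     String.mk ("H3_".toList ++ name.toList ++ "_NEW_".toList ++
                PySem.List.slice s (some ((endPos : Int) - 2)) (some ((endPos : Nat) : Int)))]

def h3_to_tokens_relative_alt (h3_str : String) (prev_h3_str : Option String) : List String :=
  let s := PySem.Chars.lower h3_str.toList
  match prev_h3_str with
  | none =>
    if s.length < 15 then
      [String.mk ("H3_SHORT_".toList ++ s)]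
    else
      [String.mk ("H3_RES_".toList ++ [PySem.List.pyGetD s 1 ' ']),
       String.mk ("H3_L1_".toList ++ PySem.List.slice s none (some ((3 : Nat) : Int))),
       String.mk ("H3_L2_".toList ++ PySem.List.slice s none (some ((5 : Nat) : Int))),
       String.mk ("H3_L3_".toList ++ PySem.List.slice s none (some ((7 : Nat) : Int))),
       String.mk ("H3_L4_".toList ++ PySem.List.slice s none (some ((9 : Nat) : Int)))]
  | some prev0 =>
    let pv := PySem.Chars.lower prev0.toList
    let p := pvLcp s pv
    let tokens : List String :=
      if 2 ≤ s.length ∧ 2 ≤ pv.length then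
        if PySem.List.pyGetD s 1 ' ' = PySem.List.pyGetD pv 1 ' ' then
          ["H3_RES_SAME"]
        else
          [String.mk ("H3_RES_CHANGE_".toList ++ [PySem.List.pyGetD s 1 ' '])]
      else []
    tokens ++ pvLevelTokens "L1" 3 s pv p ++ pvLevelTokens "L2" 5 s pv p
           ++ pvLevelTokens "L3" 7 s pv p ++ pvLevelTokens "L4" 9 s pv p

-- ===== PRECONDITION & SPEC =====
def Spec_h3_to_tokens_relative (h3_str : String) (prev_h3_str : Option String) (out : List String) : Prop := out = h3_to_tokens_relative_alt h3_str prev_h3_str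
instance (h3_str : String) (prev_h3_str : Option String) (out : List String) : Decidable (Spec_h3_to_tokens_relative h3_str prev_h3_str out) := by unfold Spec_h3_to_tokens_relative; infer_instance

-- ===== CLAIM (what is proved, stated in full; the proofs are below) =====
def Claim_equal_h3_to_tokens_relative : Prop := ∀ (h3_str : String) (prev_h3_str : Option String), Dom_h3_to_tokens_relative h3_str prev_h3_str → Spec_h3_to_tokens_relative h3_str prev_h3_str (h3_to_tokens_relative h3_str prev_h3_str)

-- ===== LEMMAS AND PROOFS =====

theorem pvLowerChar_idem (c : Char) : PySem.Chars.lowerChar (PySem.Chars.lowerChar c) = PySem.Chars.lowerChar c := by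
  simp only [PySem.Chars.lowerChar, PySem.Chars.isupper]
  split_ifs with h1 h2 <;> try rfl
  exfalso
  simp only [Bool.and_eq_true, decide_eq_true_eq, Char.le_def, Char.toNat] at h1 h2
  have hge : 65 ≤ c.val.toNat := by exact_mod_cast h1.1
  have hle : c.val.toNat ≤ 90 := by exact_mod_cast h1.2
  have hvalid : Nat.isValidChar (c.val.toNat + 32) := Or.inl (by omega)
  have hv : (Char.ofNat (c.val.toNat + 32)).val.toNat = c.val.toNat + 32 := by
    rw [Char.ofNat, dif_pos hvalid]; rfl
  have h2' : (Char.ofNat (c.val.toNat + 32)).val.toNat ≤ 90 := by exact_mod_cast h2.2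
  omega

theorem pvLower_idem (s : List Char) : PySem.Chars.lower (PySem.Chars.lower s) = PySem.Chars.lower s := by
  simp [PySem.Chars.lower, List.map_map, Function.comp, pvLowerChar_idem]

theorem pvLcp_ge_iff (ep : Nat) (s pv : List Char) (hs : ep ≤ s.length) (hp : ep ≤ pv.length) :
    ep ≤ pvLcp s pv ↔ s.take ep = pv.take ep := by
  induction ep generalizing s pv with
  | zero => simp
  | succ n ih =>
    cases s with
    | nil => simp at hs
    | cons a as =>
      cases pv with
      | nil => simp at hp
      | cons b bs =>
        simp only [pvLcp, List.take_succ_cons, List.cons.injEq]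
        by_cases hab : a = b
        · subst hab
          rw [if_pos rfl]
          simp only [true_and, Nat.add_le_add_iff_right]
          exact ih as bs (by simpa using hs) (by simpa using hp)
        · simp [hab]

-- A's per-level block equals B's _level_tokens
theorem pvLevel_eq (name : String) (ep : Nat) (h2 : 2 ≤ ep) (s pv : List Char) :
    (if ep ≤ s.length ∧ ep ≤ pv.length then
       if PySem.List.slice s none (some ((ep : Nat) : Int)) = PySem.List.slice pv none (some ((ep : Nat) : Int)) then
         [String.mk ("H3_".toList ++ name.toList ++ "_SAME".toList)]
       else
         [String.mk ("H3_".toList ++ name.toList ++ "_CHANGE".toList),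
          String.mk ("H3_".toList ++ name.toList ++ "_NEW_".toList ++
                     PySem.List.slice (PySem.List.slice s none (some ((ep : Nat) : Int))) (some (-2)) none)]
     else ([] : List String))
    = pvLevelTokens name ep s pv (pvLcp s pv) := by
  unfold pvLevelTokens
  by_cases hg : ep ≤ s.length ∧ ep ≤ pv.length
  · obtain ⟨hg1, hg2⟩ := hg
    rw [if_pos ⟨hg1, hg2⟩, if_neg (show ¬(s.length < ep ∨ pv.length < ep) by omega)]
    rw [PySem.List.slice_to_natCast, PySem.List.slice_to_natCast]
    by_cases heq : List.take ep s = List.take ep pv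
    · rw [if_pos heq, if_pos ((pvLcp_ge_iff ep s pv hg1 hg2).mpr heq)]
    · rw [if_neg heq, if_neg (fun hle => heq ((pvLcp_ge_iff ep s pv hg1 hg2).mp hle))]
      have hcast : ((ep : Int) - 2) = (((ep - 2 : Nat)) : Int) := by omega
      rw [hcast, PySem.List.slice_from_neg_ofNat (List.take ep s) 2 (by omega),
          PySem.List.slice_natCast]
      have hlen : (List.take ep s).length = ep := by
        simp only [List.length_take]; omega
      rw [hlen, List.drop_take]
  · rw [if_neg hg, if_pos (show s.length < ep ∨ pv.length < ep by omega)]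

-- the loop body appends A's per-level block to the accumulator
theorem pvStep (s pv : List Char) (acc : List String) (name : String) (ep : Nat) (h2 : 2 ≤ ep) :
    (if ep ≤ s.length ∧ ep ≤ pv.length then
       if PySem.List.slice s none (some ((ep : Nat) : Int)) = PySem.List.slice pv none (some ((ep : Nat) : Int)) then
         acc ++ [String.mk ("H3_".toList ++ name.toList ++ "_SAME".toList)]
       else
         acc ++ [String.mk ("H3_".toList ++ name.toList ++ "_CHANGE".toList),
                 String.mk ("H3_".toList ++ name.toList ++ "_NEW_".toList ++
                            PySem.List.slice (PySem.List.slice s none (some ((ep : Nat) : Int))) (some (-2)) none)]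
     else acc)
    = acc ++ pvLevelTokens name ep s pv (pvLcp s pv) := by
  rw [← pvLevel_eq name ep h2 s pv]
  split_ifs <;> simp

-- ===== VERDICT (by name: the statement is the Claim_ definition above) =====
theorem h3_to_tokens_relative_spec : Claim_equal_h3_to_tokens_relative := by
  intro h3_str prev_h3_str _hdom
  unfold Spec_h3_to_tokens_relative h3_to_tokens_relative h3_to_tokens_relative_alt
  cases prev_h3_str with
  | none =>
    simp only [pvHierOpt, pvLower_idem]
    by_cases h : 15 ≤ (PySem.Chars.lower h3_str.toList).length
    · rw [if_pos h, if_neg (by omega)]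
    · rw [if_neg h, if_pos (by omega)]
  | some prev0 =>
    simp only [List.foldl]
    rw [pvStep _ _ _ "L1" 3 (by omega), pvStep _ _ _ "L2" 5 (by omega),
        pvStep _ _ _ "L3" 7 (by omega), pvStep _ _ _ "L4" 9 (by omega)]
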